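-- pv_equiv track=rewrite | github.com/izarorbr/trabaindiv | puzzles.py | generar_pistas
-- ===== SOURCE A (Python) =====
-- def generar_pistas(matriz): #Genera pistas de filas y columnas para un Nonograma
--     pistas_filas, pistas_columnas = [], [] # Listas para almacenar las pistas
--     num_columnas = len(matriz[0])
--
--     # Filas
--     for fila in matriz: # Itera sobre cada fila de la matriz
--         pistas = []
--         contador = 0
--         for celda in fila:
--             if celda == 1: # Si la celda está rellena, incrementa el contador
--                 contador += 1
--             elif contador > 0: # Si hay un conteo en curso, lo añade a las pistas
--                 pistas.append(contador)
--                 contador = 0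
--         if contador > 0: # Añade el último conteo si existe
--             pistas.append(contador)
--         pistas_filas.append(pistas or [0]) # Añade las pistas de la fila (o [0] si está vacía)
--
--     # Columnas
--     for j in range(num_columnas): # Itera sobre cada columna
--         pistas = []
--         contador = 0
--         for i in range(len(matriz)): # Itera sobre cada fila para la columna j
--             if matriz[i][j] == 1:
--                 contador += 1
--             elif contador > 0: # Si hay un conteo en curso, lo añade a las pistas
--                 pistas.append(contador)
--                 contador = 0
--         if contador > 0: # Añade el último conteo si existe
--             pistas.append(contador)
--         pistas_columnas.append(pistas or [0]) # Añade las pistas de la columna (o [0] si está vacía)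
--
--     return pistas_filas, pistas_columnas # Devuelve las pistas generadas
-- ===== SOURCE B (Python) =====
-- def _pistas_linea(cells):
--     # materialize runs of equal cells (two-pointer), then keep lengths of runs of 1s
--     runs = []
--     i, n = 0, len(cells)
--     while i < n:
--         j = i
--         while j < n and cells[j] == cells[i]:
--             j += 1
--         runs.append((cells[i], j - i))
--         i = j
--     pistas = [longitud for valor, longitud in runs if valor == 1]
--     return pistas or [0]
--
--
-- def generar_pistas(matriz):
--     num_columnas = len(matriz[0])
--     pistas_filas = [_pistas_linea(fila) for fila in matriz]
--     pistas_columnas = [_pistas_linea([matriz[i][j] for i in range(len(matriz))])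
--                        for j in range(num_columnas)]
--     return pistas_filas, pistas_columnas
-- ===== Notes on version B (the rewrite author's own statement) =====
-- stated objective: idiomatic
-- what changed: Replaces the manual counter state machine per line with a two-phase decomposition: a run-length materialization (two-pointer span extraction) followed by filtering the lengths of runs of 1s, applied uniformly to rows and explicitly-indexed columns via one shared helper.
import Mathlib
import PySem

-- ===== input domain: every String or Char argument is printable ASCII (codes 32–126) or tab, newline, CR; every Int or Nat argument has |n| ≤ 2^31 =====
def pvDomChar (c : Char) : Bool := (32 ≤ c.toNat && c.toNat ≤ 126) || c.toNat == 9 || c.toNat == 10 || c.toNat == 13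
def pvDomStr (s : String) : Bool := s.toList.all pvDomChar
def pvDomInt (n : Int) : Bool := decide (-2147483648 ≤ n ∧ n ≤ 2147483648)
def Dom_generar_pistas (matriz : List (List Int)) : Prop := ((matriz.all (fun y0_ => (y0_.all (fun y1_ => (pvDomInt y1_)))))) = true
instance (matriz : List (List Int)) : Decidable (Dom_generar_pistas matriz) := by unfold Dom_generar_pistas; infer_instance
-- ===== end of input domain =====

-- B replaces A's per-line counter state machine by run-length materialization + filtering,
-- shared by rows and columns (objective: more idiomatic decomposition; same asymptotic cost).

-- ===== PORT A =====
-- one step of A's inner loop: state = (pistas, contador)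
def pvStepA (s : List Int × Int) (celda : Int) : List Int × Int :=
  if celda = 1 then (s.1, s.2 + 1)
  else if s.2 > 0 then (s.1 ++ [s.2], 0)
  else s

-- after the inner loop: flush the last count, then 'pistas or [0]'
def pvFinishA (s : List Int × Int) : List Int :=
  let p := if s.2 > 0 then s.1 ++ [s.2] else s.1
  if p = [] then [0] else p

def generar_pistas (matriz : List (List Int)) : List (List Int) × List (List Int) :=
  let num_columnas : Int := ((PySem.List.pyGetD matriz 0 []).length : Int)
  let pistas_filas : List (List Int) :=
    matriz.foldl (fun acc fila => acc ++ [pvFinishA (fila.foldl pvStepA ([], 0))]) []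
  let pistas_columnas : List (List Int) :=
    (PySem.List.pyRange 0 num_columnas 1).foldl (fun acc j =>
      acc ++ [pvFinishA ((PySem.List.pyRange 0 (matriz.length : Int) 1).foldl
        (fun s i => pvStepA s (PySem.List.pyGetD (PySem.List.pyGetD matriz i []) j 0)) ([], 0))]) []
  (pistas_filas, pistas_columnas)

-- ===== PORT B =====
-- run-length materialization by span extraction (the while/while two-pointer loop of Source B)
def pvRuns : List Int → List (Int × Int)
  | [] => []
  | x :: xs =>
      (x, 1 + ((xs.takeWhile (· == x)).length : Int)) :: pvRuns (xs.dropWhile (· == x))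
  termination_by l => l.length
  decreasing_by
    simp only [List.length_cons]
    exact Nat.lt_succ_of_le (List.length_dropWhile_le _ _)

def pvPistasLinea (cells : List Int) : List Int :=
  let pistas := (pvRuns cells).filterMap (fun r => if r.1 = 1 then some r.2 else none)
  if pistas = [] then [0] else pistas

def generar_pistas_alt (matriz : List (List Int)) : List (List Int) × List (List Int) :=
  let num_columnas : Int := ((PySem.List.pyGetD matriz 0 []).length : Int)
  let pistas_filas : List (List Int) := matriz.map pvPistasLinea
  let pistas_columnas : List (List Int) :=
    (PySem.List.pyRange 0 num_columnas 1).map (fun j =>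
      pvPistasLinea ((PySem.List.pyRange 0 (matriz.length : Int) 1).map
        (fun i => PySem.List.pyGetD (PySem.List.pyGetD matriz i []) j 0)))
  (pistas_filas, pistas_columnas)

-- ===== PRECONDITION & SPEC =====
-- Pre_ excludes exactly the inputs where the Python A raises IndexError: the empty matrix
-- (matriz[0]) and ragged matrices with a row shorter than the first row (matriz[i][j]).
def Pre_generar_pistas (matriz : List (List Int)) : Prop :=
  matriz ≠ [] ∧ ∀ fila ∈ matriz, (matriz.headD []).length ≤ fila.length
instance (matriz : List (List Int)) : Decidable (Pre_generar_pistas matriz) := by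
  unfold Pre_generar_pistas; infer_instance

def pvWitness_generar_pistas : List (List Int) := [[1, 0, 1], [1, 1, 0]]

def Spec_generar_pistas (matriz : List (List Int)) (out : List (List Int) × List (List Int)) : Prop := out = generar_pistas_alt matriz
instance (matriz : List (List Int)) (out : List (List Int) × List (List Int)) : Decidable (Spec_generar_pistas matriz out) := by unfold Spec_generar_pistas; infer_instance

-- ===== CLAIM (what is proved, stated in full; the proofs are below) =====
def Claim_equal_generar_pistas : Prop := ∀ (matriz : List (List Int)), Dom_generar_pistas matriz → Pre_generar_pistas matriz → Spec_generar_pistas matriz (generar_pistas matriz)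

-- ===== LEMMAS AND PROOFS =====

-- the clue list A's state machine produces from counter state c over the remaining cells
def pvG (c : Int) : List Int → List Int
  | [] => if c > 0 then [c] else []
  | x :: xs => if x = 1 then pvG (c + 1) xs else (if c > 0 then [c] else []) ++ pvG 0 xs

-- A's folded inner loop, flushed, equals pvG
theorem pvEmit_foldl (l : List Int) : ∀ (acc : List Int) (c : Int), 0 ≤ c →
    (let s := l.foldl pvStepA (acc, c); if s.2 > 0 then s.1 ++ [s.2] else s.1) = acc ++ pvG c l := by
  induction l with
  | nil => intro acc c _; simp only [List.foldl_nil, pvG]; split_ifs <;> simp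
  | cons x xs ih =>
      intro acc c hc0
      by_cases hx : x = 1
      · simp only [List.foldl_cons, pvStepA, if_pos hx, pvG, ih _ _ (by omega : (0:Int) ≤ c + 1)]
      · by_cases hc : c > 0
        · simp only [List.foldl_cons, pvStepA, if_neg hx, pvG, ih _ _ le_rfl,
            List.append_assoc, List.singleton_append, if_pos hc]
        · have hz : c = 0 := by omega
          subst hz
          have h := ih acc 0 le_rfl
          simp only at h
          simp only [List.foldl_cons, pvStepA, if_neg hx, pvG]
          simpa using h

-- with a running count c > 0, pvG absorbs the leading run of 1s
theorem pvG_ones (xs : List Int) : ∀ (c : Int), 0 < c →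
    pvG c xs = (c + ((xs.takeWhile (· == (1:Int))).length : Int)) :: pvG 0 (xs.dropWhile (· == (1:Int))) := by
  induction xs with
  | nil => intro c hc; simp [pvG, if_pos hc]
  | cons x xs ih =>
      intro c hc
      by_cases hx : x = 1
      · subst hx
        simp only [pvG, List.takeWhile_cons, List.dropWhile_cons]
        rw [ih (c + 1) (by omega)]
        simp; ring_nf
      · have hx' : ¬ ((x == (1:Int)) = true) := by simp [hx]
        simp only [pvG, if_neg hx, if_pos hc, List.takeWhile_cons, List.dropWhile_cons, hx',
          Bool.false_eq_true, if_false]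
        simp [pvG, if_neg hx]

-- a leading run of x ≠ 1 contributes nothing to pvG 0
theorem pvG_skip (xs : List Int) : ∀ (x : Int), x ≠ 1 →
    pvG 0 (xs.dropWhile (· == x)) = pvG 0 xs := by
  induction xs with
  | nil => intro x _; simp
  | cons y ys ih =>
      intro x hx
      by_cases hy : y = x
      · subst hy
        simp only [List.dropWhile_cons, BEq.rfl, if_true]
        rw [ih y hx]
        simp [pvG, if_neg hx]
      · simp [hy]

-- B's runs+filter equals A's state machine reading (from count 0)
theorem pvG_zero_eq_clues (l : List Int) :
    pvG 0 l = (pvRuns l).filterMap (fun r => if r.1 = 1 then some r.2 else none) := by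
  induction l using pvRuns.induct with
  | case1 => simp [pvG, pvRuns]
  | case2 x xs ih =>
      rw [pvRuns]
      by_cases hx : x = 1
      · subst hx
        simp only [List.filterMap_cons]
        rw [pvG, if_pos rfl, pvG_ones xs (0 + 1) (by omega), ih]
        norm_num
      · simp only [List.filterMap_cons, if_neg hx]
        rw [pvG, if_neg hx, ← ih, ← pvG_skip xs x hx]
        simp

-- per-line equality: A's flushed fold with the [0] default equals B's helper
theorem pvLine_eq (l : List Int) : pvFinishA (l.foldl pvStepA ([], 0)) = pvPistasLinea l := by
  unfold pvFinishA pvPistasLinea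
  have h := pvEmit_foldl l [] 0 le_rfl
  simp only at h
  rw [h, List.nil_append, pvG_zero_eq_clues]

-- ===== VERDICT (by name: the statement is the Claim_ definition above) =====
theorem generar_pistas_spec : Claim_equal_generar_pistas := by
  intro matriz _ _
  unfold Spec_generar_pistas generar_pistas generar_pistas_alt
  refine Prod.ext ?_ ?_
  · simp only [PySem.List.foldl_append_singleton_eq_map]
    exact List.map_congr_left (fun fila _ => pvLine_eq fila)
  · simp only [PySem.List.foldl_append_singleton_eq_map]
    refine List.map_congr_left (fun j _ => ?_)
    have : ((PySem.List.pyRange 0 (matriz.length : Int) 1).foldl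
        (fun s i => pvStepA s (PySem.List.pyGetD (PySem.List.pyGetD matriz i []) j 0)) ([], 0))
        = ((PySem.List.pyRange 0 (matriz.length : Int) 1).map
            (fun i => PySem.List.pyGetD (PySem.List.pyGetD matriz i []) j 0)).foldl pvStepA ([], 0) := by
      rw [List.foldl_map]
    rw [this, pvLine_eq]
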